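-- pv_equiv track=rewrite | github.com/bhupenderkumar/solana-trading-bot | backend/app/agents/sentiment_agent.py | _detect_coins
-- ===== SOURCE A (Python) =====
-- def _detect_coins(message: str) -> list:
--     """Detect coin symbols from message."""
--     message_lower = message.lower()
--     coin_map = {
--         "sol": "SOL", "solana": "SOL",
--         "btc": "BTC", "bitcoin": "BTC",
--         "eth": "ETH", "ethereum": "ETH",
--         "doge": "DOGE", "dogecoin": "DOGE",
--         "xrp": "XRP", "ripple": "XRP",
--         "bonk": "BONK",
--         "wif": "WIF",
--         "pepe": "PEPE"
--     }
--
--     coins = []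
--     for pattern, coin in coin_map.items():
--         if pattern in message_lower and coin not in coins:
--             coins.append(coin)
--
--     return coins
-- ===== SOURCE B (Python) =====
-- def _detect_coins(message: str) -> list:
--     """Detect coin symbols from message."""
--     message_lower = message.lower()
--     coin_aliases = [
--         ("SOL", ["sol", "solana"]),
--         ("BTC", ["btc", "bitcoin"]),
--         ("ETH", ["eth", "ethereum"]),
--         ("DOGE", ["doge", "dogecoin"]),
--         ("XRP", ["xrp", "ripple"]),
--         ("BONK", ["bonk"]),
--         ("WIF", ["wif"]),
--         ("PEPE", ["pepe"]),
--     ]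
--     return [coin for coin, aliases in coin_aliases
--             if any(alias in message_lower for alias in aliases)]
-- ===== Notes on version B (the rewrite author's own statement) =====
-- stated objective: simpler
-- what changed: Data regrouped as coin -> alias list traversed with a filtering comprehension and any(), eliminating A's mutable accumulator and its membership dedup scan entirely.
import Mathlib
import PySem

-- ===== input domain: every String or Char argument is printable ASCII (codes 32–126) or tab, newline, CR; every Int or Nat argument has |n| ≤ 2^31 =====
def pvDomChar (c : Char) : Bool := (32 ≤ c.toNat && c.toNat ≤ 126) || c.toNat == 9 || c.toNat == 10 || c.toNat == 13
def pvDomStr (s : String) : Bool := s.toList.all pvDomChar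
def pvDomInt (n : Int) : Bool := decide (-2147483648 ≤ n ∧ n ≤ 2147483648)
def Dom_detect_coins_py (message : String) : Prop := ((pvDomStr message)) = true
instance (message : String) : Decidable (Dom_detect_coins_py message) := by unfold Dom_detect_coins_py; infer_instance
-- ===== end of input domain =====

-- B replaces A's pattern->coin dict walk with its dedup guard by a coin->aliases table
-- filtered with any(); simpler (no accumulator-membership scan). Same return value everywhere.

-- ===== PORT A =====
-- the loop body of A: 'if pattern in message_lower and coin not in coins: coins.append(coin)'
def pvStepA (message_lower : String) : List String → String × String → List String :=
  fun coins pc =>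
    if PySem.Str.isIn pc.1 message_lower && !(coins.contains pc.2) then coins ++ [pc.2]
    else coins

def detect_coins_py (message : String) : List String :=
  let message_lower := PySem.Str.lower message
  let coin_map : PySem.Dict String String := PySem.Dict.ofList
    [("sol", "SOL"), ("solana", "SOL"),
     ("btc", "BTC"), ("bitcoin", "BTC"),
     ("eth", "ETH"), ("ethereum", "ETH"),
     ("doge", "DOGE"), ("dogecoin", "DOGE"),
     ("xrp", "XRP"), ("ripple", "XRP"),
     ("bonk", "BONK"), ("wif", "WIF"), ("pepe", "PEPE")]
  coin_map.items.foldl (pvStepA message_lower) []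

-- ===== PORT B =====
def pvCoinAliases : List (String × List String) :=
  [("SOL", ["sol", "solana"]),
   ("BTC", ["btc", "bitcoin"]),
   ("ETH", ["eth", "ethereum"]),
   ("DOGE", ["doge", "dogecoin"]),
   ("XRP", ["xrp", "ripple"]),
   ("BONK", ["bonk"]),
   ("WIF", ["wif"]),
   ("PEPE", ["pepe"])]

def detect_coins_py_alt (message : String) : List String :=
  let message_lower := PySem.Str.lower message
  (pvCoinAliases.filter
    (fun g => g.2.any (fun al => PySem.Str.isIn al message_lower))).map Prod.fst

-- ===== PRECONDITION & SPEC =====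
def Spec_detect_coins_py (message : String) (out : List String) : Prop := out = detect_coins_py_alt message
instance (message : String) (out : List String) : Decidable (Spec_detect_coins_py message out) := by unfold Spec_detect_coins_py; infer_instance

-- ===== CLAIM (what is proved, stated in full; the proofs are below) =====
def Claim_equal_detect_coins_py : Prop := ∀ (message : String), Dom_detect_coins_py message → Spec_detect_coins_py message (detect_coins_py message)

-- ===== LEMMAS AND PROOFS =====

-- once a coin is in the accumulator, further aliases of the same coin are no-ops
lemma pvStepA_noop (ml c : String) (aliases coins : List String) (hc : c ∈ coins) :
    (aliases.map (fun a => (a, c))).foldl (pvStepA ml) coins = coins := by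
  induction aliases with
  | nil => rfl
  | cons a t ih => simp [pvStepA, hc, ih]

-- one group of aliases for a fresh coin c behaves like an any()-test
lemma pvStepA_group (ml c : String) (aliases coins : List String) (hc : c ∉ coins) :
    (aliases.map (fun a => (a, c))).foldl (pvStepA ml) coins =
      if aliases.any (fun a => PySem.Str.isIn a ml) then coins ++ [c] else coins := by
  induction aliases with
  | nil => simp
  | cons a t ih =>
    simp only [List.map_cons, List.foldl_cons, List.any_cons]
    rcases Bool.eq_false_or_eq_true (PySem.Str.isIn a ml) with hI | hI
    · have hI2 : PySem.Chars.isIn a.toList ml.toList = true := by simpa using hI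
      have h1 : pvStepA ml coins (a, c) = coins ++ [c] := by simp [pvStepA, hI2, hc]
      rw [h1, pvStepA_noop ml c t (coins ++ [c]) (by simp)]
      simp [hI2]
    · have hI2 : PySem.Chars.isIn a.toList ml.toList = false := by simpa using hI
      have h1 : pvStepA ml coins (a, c) = coins := by simp [pvStepA, hI2]
      rw [h1, ih]
      simp [hI2]

-- A's fold over the flattened alias/coin pairs equals B's filter over the groups,
-- provided the group coins are distinct and not already in the accumulator
lemma pvMain (ml : String) (groups : List (String × List String)) (coins : List String)
    (hfresh : ∀ g ∈ groups, g.1 ∉ coins) (hnodup : (groups.map Prod.fst).Nodup) :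
    (groups.flatMap (fun g => g.2.map (fun a => (a, g.1)))).foldl (pvStepA ml) coins =
      coins ++ (groups.filter (fun g => g.2.any (fun a => PySem.Str.isIn a ml))).map Prod.fst := by
  induction groups generalizing coins with
  | nil => simp
  | cons g rest ih =>
    obtain ⟨c, aliases⟩ := g
    simp only [List.flatMap_cons, List.foldl_append]
    rw [pvStepA_group ml c aliases coins (hfresh (c, aliases) (List.mem_cons_self))]
    simp only [List.map_cons, List.nodup_cons] at hnodup
    by_cases h : (aliases.any fun a => PySem.Str.isIn a ml) = true
    · rw [if_pos h, ih (coins ++ [c]) ?_ hnodup.2]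
      · have h2 : ∃ x ∈ aliases, PySem.Chars.isIn x.toList ml.toList = true := by simpa using h
        simp [h2]
      · intro g hg
        simp only [List.mem_append, List.mem_singleton]
        rintro (hmem | rfl)
        · exact hfresh g (List.mem_cons_of_mem _ hg) hmem
        · exact hnodup.1 (List.mem_map_of_mem hg)
    · rw [if_neg h, ih coins (fun g hg => hfresh g (List.mem_cons_of_mem _ hg)) hnodup.2]
      have h2 : ¬ ∃ x ∈ aliases, PySem.Chars.isIn x.toList ml.toList = true := by simpa using h
      simp [h2]

-- ===== VERDICT (by name: the statement is the Claim_ definition above) =====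
theorem detect_coins_py_spec : Claim_equal_detect_coins_py := by
  intro message _
  unfold Spec_detect_coins_py detect_coins_py detect_coins_py_alt
  have hitems :
      (PySem.Dict.ofList
        [("sol", "SOL"), ("solana", "SOL"),
         ("btc", "BTC"), ("bitcoin", "BTC"),
         ("eth", "ETH"), ("ethereum", "ETH"),
         ("doge", "DOGE"), ("dogecoin", "DOGE"),
         ("xrp", "XRP"), ("ripple", "XRP"),
         ("bonk", "BONK"), ("wif", "WIF"), ("pepe", "PEPE")] : PySem.Dict String String).items
        = pvCoinAliases.flatMap (fun g => g.2.map (fun a => (a, g.1))) := by decide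
  simp only [hitems]
  rw [pvMain (PySem.Str.lower message) pvCoinAliases [] (by simp) (by decide)]
  simp
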